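-- pv_equiv track=rewrite | github.com/PRKKILLER/Algorithm_Practice | Company-OA/Robinhood/MatrixOverQueries.py | solution
-- ===== SOURCE A (Python) =====
-- from collections import defaultdict
--
-- def solution(arr, matrix):
--     res = 0
--     mapping = defaultdict(list)
--
--     for row in matrix:
--         mapping[row[2]].append((row[0], row[1]))
--
--     for i, num in enumerate(arr):
--         if num in mapping:
--             for d in mapping[num]:
--                 if d[0] <= i <= d[1]:
--                     res += 1
--
--     return res
-- ===== SOURCE B (Python) =====
-- from bisect import bisect_left, bisect_right
--
-- def solution(arr, matrix):
--     # index positions of each value once; per matrix row, count positions in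
--     # [row[0], row[1]] by binary search in the (increasing) position list
--     positions = {}
--     for i, num in enumerate(arr):
--         positions.setdefault(num, []).append(i)
--     res = 0
--     for row in matrix:
--         idxs = positions.get(row[2])
--         if idxs is not None:
--             lo = bisect_left(idxs, row[0])
--             hi = bisect_right(idxs, row[1])
--             if lo < hi:
--                 res += hi - lo
--     return res
-- ===== Notes on version B (the rewrite author's own statement) =====
-- stated objective: faster
-- what changed: Instead of scanning, for every index of arr, all same-valued matrix rows (quadratic when many rows share a value), B builds a value-to-sorted-position-list index of arr once and answers each matrix row with two binary searches (bisect) over that list.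
import Mathlib
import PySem

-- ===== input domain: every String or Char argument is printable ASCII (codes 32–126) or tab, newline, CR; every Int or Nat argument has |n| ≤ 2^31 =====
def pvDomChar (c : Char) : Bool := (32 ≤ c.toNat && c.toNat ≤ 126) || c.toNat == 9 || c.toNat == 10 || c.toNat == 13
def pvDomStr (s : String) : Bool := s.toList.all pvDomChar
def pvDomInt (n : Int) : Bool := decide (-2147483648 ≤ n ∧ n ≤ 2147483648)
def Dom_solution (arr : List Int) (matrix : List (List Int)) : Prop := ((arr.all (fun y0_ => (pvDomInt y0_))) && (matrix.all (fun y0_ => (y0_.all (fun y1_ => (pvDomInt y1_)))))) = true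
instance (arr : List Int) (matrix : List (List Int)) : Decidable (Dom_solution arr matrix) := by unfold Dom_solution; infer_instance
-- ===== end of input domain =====

-- B replaces A's per-index scan over all same-valued rows by one value→positions
-- index plus a binary-search count per matrix row (objective: faster, asymptotic).

-- ===== PORT A =====
-- literal transliteration of Source A: group rows by value, then for each (i, num)
-- scan the rows of that value and count intervals containing i
def solution (arr : List Int) (matrix : List (List Int)) : Int :=
  let mapping : PySem.Dict Int (List (Int × Int)) :=
    matrix.foldl (fun d row =>
      d.modify (PySem.List.pyGetD row 2 0) []
        (fun l => l ++ [(PySem.List.pyGetD row 0 0, PySem.List.pyGetD row 1 0)])) PySem.Dict.empty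
  (PySem.List.enumerate arr).foldl (fun res p =>
    if mapping.contains p.2 then
      (mapping.getD p.2 []).foldl
        (fun res d => if d.1 ≤ p.1 ∧ p.1 ≤ d.2 then res + 1 else res) res
    else res) 0

-- ===== PORT B =====
-- literal transliteration of Source B: positions.setdefault(num, []).append(i) is
-- Dict.modify (append to the value under the key); bisect_left / bisect_right
-- are PySem.List.bisectLeft / bisectRight
def solution_alt (arr : List Int) (matrix : List (List Int)) : Int :=
  let positions : PySem.Dict Int (List Int) :=
    (PySem.List.enumerate arr).foldl (fun d p => d.modify p.2 [] (fun l => l ++ [p.1]))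
      PySem.Dict.empty
  matrix.foldl (fun res row =>
    match positions.get? (PySem.List.pyGetD row 2 0) with
    | none => res
    | some idxs =>
        let lo := PySem.List.bisectLeft idxs (PySem.List.pyGetD row 0 0)
        let hi := PySem.List.bisectRight idxs (PySem.List.pyGetD row 1 0)
        if lo < hi then res + ((hi : Int) - (lo : Int)) else res) 0

-- ===== PRECONDITION & SPEC =====
-- Pre_ excludes exactly the inputs where the Python raises: a row shorter than 3
-- makes row[2] (or row[0]/row[1]) an IndexError in A (and in B).
def Pre_solution (arr : List Int) (matrix : List (List Int)) : Prop :=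
  ∀ row ∈ matrix, 3 ≤ row.length
instance (arr : List Int) (matrix : List (List Int)) : Decidable (Pre_solution arr matrix) := by
  unfold Pre_solution; infer_instance
def pvWitness_solution : List Int × List (List Int) := ([1, 2, 1], [[0, 2, 1], [1, 1, 2]])
def Spec_solution (arr : List Int) (matrix : List (List Int)) (out : Int) : Prop :=
  out = solution_alt arr matrix
instance (arr : List Int) (matrix : List (List Int)) (out : Int) :
    Decidable (Spec_solution arr matrix out) := by unfold Spec_solution; infer_instance

-- ===== CLAIM (what is proved, stated in full; the proofs are below) =====
def Claim_equal_solution : Prop := ∀ (arr : List Int) (matrix : List (List Int)),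
  Dom_solution arr matrix → Pre_solution arr matrix →
  Spec_solution arr matrix (solution arr matrix)

-- ===== LEMMAS AND PROOFS =====

-- the common predicate: index-value pair p matches row r
def pvMatch (p : Int × Int) (r : List Int) : Bool :=
  (PySem.List.pyGetD r 2 0 == p.2) &&
    decide (PySem.List.pyGetD r 0 0 ≤ p.1) && decide (p.1 ≤ PySem.List.pyGetD r 1 0)

theorem countP_eq_of_cut {α : Type} (xs : List α) (p : α → Bool) (k : Nat)
    (hk : k ≤ xs.length)
    (h1 : ∀ (j : Nat) (hj : j < xs.length), j < k → p xs[j])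
    (h2 : ∀ (j : Nat) (hj : j < xs.length), k ≤ j → ¬ p xs[j]) :
    xs.countP p = k := by
  have hsplit : xs = xs.take k ++ xs.drop k := (List.take_append_drop k xs).symm
  rw [hsplit, List.countP_append]
  have htake : (xs.take k).countP p = k := by
    have hlen : (xs.take k).length = k := by simp [List.length_take]; omega
    rw [List.countP_eq_length.mpr, hlen]
    intro a ha
    obtain ⟨j, hj, rfl⟩ := List.mem_iff_getElem.mp ha
    rw [List.getElem_take]
    exact h1 j (by simp at hj; omega) (by simp at hj; omega)
  have hdrop : (xs.drop k).countP p = 0 := by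
    rw [List.countP_eq_zero]
    intro a ha
    obtain ⟨j, hj, rfl⟩ := List.mem_iff_getElem.mp ha
    rw [List.getElem_drop]
    exact h2 (k + j) (by simp at hj; omega) (by omega)
  omega

theorem bisectLeft_eq (xs : List Int) (x : Int) (h : xs.Pairwise (· ≤ ·)) :
    PySem.List.bisectLeft xs x = xs.countP (fun i => decide (i < x)) := by
  obtain ⟨hle, hlt, hge⟩ := PySem.List.bisectLeft_spec xs x h
  exact (countP_eq_of_cut xs _ _ hle
    (fun j hj hjk => by simpa using hlt j hj hjk)
    (fun j hj hjk => by simpa using hge j hj hjk)).symm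

theorem bisectRight_eq (xs : List Int) (x : Int) (h : xs.Pairwise (· ≤ ·)) :
    PySem.List.bisectRight xs x = xs.countP (fun i => decide (i ≤ x)) := by
  obtain ⟨hle, hlt, hge⟩ := PySem.List.bisectRight_spec xs x h
  exact (countP_eq_of_cut xs _ _ hle
    (fun j hj hjk => by simpa using hlt j hj hjk)
    (fun j hj hjk => by simpa using hge j hj hjk)).symm

theorem sum_countP_comm {α β : Type} (l1 : List α) (l2 : List β) (q : α → β → Bool) :
    (l1.map (fun x => ((l2.countP (q x) : Nat) : Int))).sum
      = (l2.map (fun y => ((l1.countP (fun x => q x y) : Nat) : Int))).sum := by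
  induction l1 with
  | nil => simp
  | cons a l1 ih =>
      simp only [List.map_cons, List.sum_cons, List.countP_cons]
      have : (l2.map (fun y => ((l1.countP (fun x => q x y) + if q a y then 1 else 0 : Nat) : Int))).sum
          = (l2.map (fun y => ((l1.countP (fun x => q x y) : Nat) : Int) + ((if q a y then 1 else 0 : Nat) : Int))).sum := by
        push_cast
        rfl
      have h2 : (l2.map (fun y => ((if q a y then 1 else 0 : Nat) : Int))).sum
          = ((l2.countP (q a) : Nat) : Int) := by
        rw [← PySem.List.sum_map_ite_one_zero (q a) l2]
        congr 1; apply List.map_congr_left; intro y _; split <;> simp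
      rw [this, PySem.List.sum_map_add_int, ← ih, h2]; ring

theorem countP_partition {α : Type} (l : List α) (P Q R : α → Bool)
    (h : ∀ x ∈ l, (P x = true ↔ (Q x = true ∨ R x = true)) ∧ ¬(Q x = true ∧ R x = true)) :
    l.countP P = l.countP Q + l.countP R := by
  induction l with
  | nil => simp
  | cons a l ih =>
      simp only [List.countP_cons]
      have ha := h a (List.mem_cons_self)
      have := ih (fun x hx => h x (List.mem_cons_of_mem a hx))
      rcases hP : P a <;> rcases hQ : Q a <;> rcases hR : R a <;>
        simp [hP, hQ, hR] at ha ⊢ <;> omega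

theorem A_getD (matrix : List (List Int)) (v : Int) :
    (matrix.foldl (fun d row =>
      d.modify (PySem.List.pyGetD row 2 0) []
        (fun l => l ++ [(PySem.List.pyGetD row 0 0, PySem.List.pyGetD row 1 0)])) PySem.Dict.empty).getD v []
    = ((matrix.filter (fun r => PySem.List.pyGetD r 2 0 == v)).map
        (fun r => (PySem.List.pyGetD r 0 0, PySem.List.pyGetD r 1 0))) := by
  have h : (matrix.foldl (fun (d : PySem.Dict Int (List (Int × Int))) row =>
      d.modify (PySem.List.pyGetD row 2 0) []
        (fun l => l ++ [(PySem.List.pyGetD row 0 0, PySem.List.pyGetD row 1 0)])) PySem.Dict.empty)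
    = ((matrix.map (fun (r : List Int) => (PySem.List.pyGetD r 2 0,
        (PySem.List.pyGetD r 0 0, PySem.List.pyGetD r 1 0)))).foldl
        (fun d p => d.modify p.1 [] (fun l => l ++ [p.2])) PySem.Dict.empty) := by
    simp [List.foldl_map]
  rw [h, PySem.Dict.getD_foldl_modify_append]
  simp [List.filter_map, Function.comp_def]
theorem A_keys (matrix : List (List Int)) (v : Int) :
    ((matrix.foldl (fun d row =>
      d.modify (PySem.List.pyGetD row 2 0) []
        (fun l => l ++ [(PySem.List.pyGetD row 0 0, PySem.List.pyGetD row 1 0)])) PySem.Dict.empty).contains v) = true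
    ↔ v ∈ matrix.map (fun r => PySem.List.pyGetD r 2 0) := by
  rw [PySem.Dict.contains_iff_mem_keys, PySem.Dict.keys_foldl_modify_key]
  simp [PySem.Set.update_nil_left, PySem.Set.mem_ofList]

theorem A_eq_sum (arr : List Int) (matrix : List (List Int)) :
    solution arr matrix
      = ((PySem.List.enumerate arr).map
          (fun p => ((matrix.countP (fun r => pvMatch p r) : Nat) : Int))).sum := by
  have hred : solution arr matrix = (PySem.List.enumerate arr).foldl (fun res p =>
      if (matrix.foldl (fun d row =>
          d.modify (PySem.List.pyGetD row 2 0) []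
            (fun l => l ++ [(PySem.List.pyGetD row 0 0, PySem.List.pyGetD row 1 0)])) PySem.Dict.empty).contains p.2 then
        ((matrix.foldl (fun d row =>
          d.modify (PySem.List.pyGetD row 2 0) []
            (fun l => l ++ [(PySem.List.pyGetD row 0 0, PySem.List.pyGetD row 1 0)])) PySem.Dict.empty).getD p.2 []).foldl
          (fun res d => if d.1 ≤ p.1 ∧ p.1 ≤ d.2 then res + 1 else res) res
      else res) 0 := rfl
  rw [hred]
  have hstep : ∀ (res : Int) (p : Int × Int), p ∈ PySem.List.enumerate arr →
      (if (matrix.foldl (fun d row =>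
          d.modify (PySem.List.pyGetD row 2 0) []
            (fun l => l ++ [(PySem.List.pyGetD row 0 0, PySem.List.pyGetD row 1 0)])) PySem.Dict.empty).contains p.2 then
        ((matrix.foldl (fun d row =>
          d.modify (PySem.List.pyGetD row 2 0) []
            (fun l => l ++ [(PySem.List.pyGetD row 0 0, PySem.List.pyGetD row 1 0)])) PySem.Dict.empty).getD p.2 []).foldl
          (fun res d => if d.1 ≤ p.1 ∧ p.1 ≤ d.2 then res + 1 else res) res
      else res)
      = res + ((matrix.countP (fun r => pvMatch p r) : Nat) : Int) := by
    intro res p _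
    by_cases hc : (matrix.foldl (fun d row =>
        d.modify (PySem.List.pyGetD row 2 0) []
          (fun l => l ++ [(PySem.List.pyGetD row 0 0, PySem.List.pyGetD row 1 0)])) PySem.Dict.empty).contains p.2 = true
    · rw [if_pos hc, PySem.List.foldl_ite_add_one, A_getD]
      congr 2
      rw [List.countP_map, List.countP_filter]
      apply List.countP_congr
      intro r _
      simp [pvMatch, Function.comp]
      tauto
    · rw [if_neg hc]
      have hnz : matrix.countP (fun r => pvMatch p r) = 0 := by
        rw [List.countP_eq_zero]
        intro r hr hm
        apply hc
        rw [A_keys]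
        have : (PySem.List.pyGetD r 2 0 == p.2) = true := by
          simp [pvMatch] at hm; simp [hm]
        simp only [beq_iff_eq] at this
        exact this ▸ List.mem_map_of_mem hr
      rw [hnz]; simp
  rw [PySem.List.foldl_congr_mem _ _ _ _ hstep]
  rw [PySem.List.foldl_add]
  simp

theorem B_getD (arr : List Int) (v : Int) :
    ((PySem.List.enumerate arr).foldl (fun d p => d.modify p.2 [] (fun l => l ++ [p.1]))
      PySem.Dict.empty).getD v []
    = ((PySem.List.enumerate arr).filter (fun p => p.2 == v)).map (fun p => p.1) := by
  have h : ((PySem.List.enumerate arr).foldl (fun d p => d.modify p.2 [] (fun l => l ++ [p.1]))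
      PySem.Dict.empty)
    = (((PySem.List.enumerate arr).map (fun p => (p.2, p.1))).foldl
        (fun d p => d.modify p.1 [] (fun l => l ++ [p.2])) PySem.Dict.empty) := by
    simp [List.foldl_map]
  rw [h, PySem.Dict.getD_foldl_modify_append]
  simp [List.filter_map, Function.comp_def]

theorem B_keys (arr : List Int) (v : Int) :
    (((PySem.List.enumerate arr).foldl (fun d p => d.modify p.2 [] (fun l => l ++ [p.1]))
      PySem.Dict.empty).contains v) = true
    ↔ v ∈ (PySem.List.enumerate arr).map (fun p => p.2) := by
  have h : ((PySem.List.enumerate arr).foldl (fun d p => d.modify p.2 [] (fun l => l ++ [p.1]))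
      PySem.Dict.empty)
    = ((PySem.List.enumerate arr).foldl
        (fun d p => d.modify ((fun (q : Int × Int) => q.2) p) [] ((fun (d : PySem.Dict Int (List Int)) (p : Int × Int) (l : List Int) => l ++ [p.1]) d p)) PySem.Dict.empty) := rfl
  rw [h, PySem.Dict.contains_iff_mem_keys, PySem.Dict.keys_foldl_modify_key]
  simp [PySem.Set.update_nil_left, PySem.Set.mem_ofList]

theorem B_eq_sum (arr : List Int) (matrix : List (List Int)) :
    solution_alt arr matrix
      = (matrix.map
          (fun r => (((PySem.List.enumerate arr).countP (fun p => pvMatch p r) : Nat) : Int))).sum := by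
  have hred : solution_alt arr matrix = matrix.foldl (fun res row =>
      match ((PySem.List.enumerate arr).foldl (fun d p => d.modify p.2 [] (fun l => l ++ [p.1]))
          PySem.Dict.empty).get? (PySem.List.pyGetD row 2 0) with
      | none => res
      | some idxs =>
          let lo := PySem.List.bisectLeft idxs (PySem.List.pyGetD row 0 0)
          let hi := PySem.List.bisectRight idxs (PySem.List.pyGetD row 1 0)
          if lo < hi then res + ((hi : Int) - (lo : Int)) else res) 0 := rfl
  rw [hred]
  have hstep : ∀ (res : Int), ∀ row ∈ matrix,
      (match ((PySem.List.enumerate arr).foldl (fun d p => d.modify p.2 [] (fun l => l ++ [p.1]))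
          PySem.Dict.empty).get? (PySem.List.pyGetD row 2 0) with
      | none => res
      | some idxs =>
          let lo := PySem.List.bisectLeft idxs (PySem.List.pyGetD row 0 0)
          let hi := PySem.List.bisectRight idxs (PySem.List.pyGetD row 1 0)
          if lo < hi then res + ((hi : Int) - (lo : Int)) else res)
      = res + (((PySem.List.enumerate arr).countP (fun p => pvMatch p row) : Nat) : Int) := by
    intro res row _
    rcases hg : ((PySem.List.enumerate arr).foldl (fun d p => d.modify p.2 [] (fun l => l ++ [p.1]))
        PySem.Dict.empty).get? (PySem.List.pyGetD row 2 0) with _ | idxs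
    · have hnm : PySem.List.pyGetD row 2 0 ∉ (PySem.List.enumerate arr).map (fun p => p.2) := by
        intro hmem
        have := (B_keys arr (PySem.List.pyGetD row 2 0)).mpr hmem
        rw [PySem.Dict.contains_eq_isSome_get?, hg] at this
        simp at this
      have hz : (PySem.List.enumerate arr).countP (fun p => pvMatch p row) = 0 := by
        rw [List.countP_eq_zero]
        intro p hp hm
        apply hnm
        simp only [pvMatch, Bool.and_eq_true, decide_eq_true_eq, beq_iff_eq] at hm
        rw [hm.1.1]
        exact List.mem_map_of_mem hp
      simp only [hg]
      simp [hz]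
    · simp only [hg]
      show (if PySem.List.bisectLeft idxs (PySem.List.pyGetD row 0 0) <
              PySem.List.bisectRight idxs (PySem.List.pyGetD row 1 0) then
            res + (((PySem.List.bisectRight idxs (PySem.List.pyGetD row 1 0) : Nat) : Int)
                 - ((PySem.List.bisectLeft idxs (PySem.List.pyGetD row 0 0) : Nat) : Int))
          else res)
        = res + ((List.countP (fun p => pvMatch p row) (PySem.List.enumerate arr) : Nat) : Int)
      have hidx : idxs = ((PySem.List.enumerate arr).filter
          (fun p => p.2 == PySem.List.pyGetD row 2 0)).map (fun p => p.1) := by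
        rw [← B_getD arr (PySem.List.pyGetD row 2 0), PySem.Dict.getD_eq_get?_getD, hg]; rfl
      have hsort : idxs.Pairwise (· ≤ ·) := by
        rw [hidx, List.pairwise_map]
        apply List.Pairwise.imp (fun h => le_of_lt h)
        exact (PySem.List.pairwise_lt_enumerate arr 0).filter _
      have hlo : PySem.List.bisectLeft idxs (PySem.List.pyGetD row 0 0)
          = (PySem.List.enumerate arr).countP
              (fun p => decide (p.1 < PySem.List.pyGetD row 0 0) && (p.2 == PySem.List.pyGetD row 2 0)) := by
        rw [bisectLeft_eq idxs _ hsort, hidx, List.countP_map, List.countP_filter]; rfl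
      have hhi : PySem.List.bisectRight idxs (PySem.List.pyGetD row 1 0)
          = (PySem.List.enumerate arr).countP
              (fun p => decide (p.1 ≤ PySem.List.pyGetD row 1 0) && (p.2 == PySem.List.pyGetD row 2 0)) := by
        rw [bisectRight_eq idxs _ hsort, hidx, List.countP_map, List.countP_filter]; rfl
    
      by_cases hab : PySem.List.pyGetD row 0 0 ≤ PySem.List.pyGetD row 1 0
      · have hkey : PySem.List.bisectRight idxs (PySem.List.pyGetD row 1 0)
            = PySem.List.bisectLeft idxs (PySem.List.pyGetD row 0 0)
              + (PySem.List.enumerate arr).countP (fun p => pvMatch p row) := by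
          rw [hlo, hhi]
          apply countP_partition
          intro p _
          simp only [pvMatch, Bool.and_eq_true, decide_eq_true_eq, beq_iff_eq]
          omega
        split_ifs with hc <;> omega
      · have hz : (PySem.List.enumerate arr).countP (fun p => pvMatch p row) = 0 := by
          rw [List.countP_eq_zero]
          intro p hp hm
          simp only [pvMatch, Bool.and_eq_true, decide_eq_true_eq, beq_iff_eq] at hm
          omega
        have hkey : PySem.List.bisectRight idxs (PySem.List.pyGetD row 1 0)
            ≤ PySem.List.bisectLeft idxs (PySem.List.pyGetD row 0 0) := by
          rw [hlo, hhi]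
          apply List.countP_mono_left
          intro p _ h
          simp only [Bool.and_eq_true, decide_eq_true_eq, beq_iff_eq] at h ⊢
          exact ⟨by omega, h.2⟩
        split_ifs with hc <;> omega
  rw [PySem.List.foldl_congr_mem _ _ _ _ hstep, PySem.List.foldl_add]
  simp


-- ===== VERDICT (by name: the statement is the Claim_ definition above) =====
theorem solution_spec : Claim_equal_solution := by
  intro arr matrix _ _
  unfold Spec_solution
  rw [A_eq_sum, B_eq_sum, sum_countP_comm]
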